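-- pv_equiv track=rewrite | github.com/usnistgov/feasst | plugin/flat_histogram/tutorial/tutorial_15_n-alkane.py | gen_grow
-- ===== SOURCE A (Python) =====
-- def gen_grow(num_sites, reptate=False):
--     grow=[]
--     grow_inv=[]
--     for site in range(num_sites):
--         site_inv = num_sites - site - 1
--         if reptate:
--             if site == num_sites - 1:
--                 grow += [{"dihedral": "true", "mobile_site": str(site), "anchor_site": str(site-1), "anchor_site2": str(site-2), "anchor_site3": str(site-3)}]
--                 grow_inv += [{"dihedral": "true", "mobile_site": "0", "anchor_site": "1", "anchor_site2": "2", "anchor_site3": "3"}]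
--             else:
--                 grow +=     [{"reptate": "true", "num_steps": "1", "mobile_site": str(site), "anchor_site": str(site+1)}]
--                 grow_inv += [{"reptate": "true", "num_steps": "1", "mobile_site": str(site_inv), "anchor_site": str(site_inv - 1)}]
--         elif site == 0:
--             grow += [{"transfer": "true", "site": "0"}]
--             grow_inv += [{"transfer": "true", "site": str(site_inv)}]
--         elif site == 1:
--             grow += [{"bond": "true", "mobile_site": "1", "anchor_site": "0"}]
--             grow_inv += [{"bond": "true", "mobile_site": str(site_inv), "anchor_site": str(site_inv + 1)}]
--         elif site == 2:
--             grow += [{"angle": "true", "mobile_site": "2", "anchor_site": "1", "anchor_site2": "0"}]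
--             grow_inv += [{"angle": "true", "mobile_site": str(site_inv), "anchor_site": str(site_inv + 1), "anchor_site2": str(site_inv + 2)}]
--         else:
--             grow += [{"dihedral": "true", "mobile_site": str(site), "anchor_site": str(site-1), "anchor_site2": str(site-2), "anchor_site3": str(site-3)}]
--             grow_inv += [{"dihedral": "true", "mobile_site": str(site_inv), "anchor_site": str(site_inv + 1), "anchor_site2": str(site_inv + 2), "anchor_site3": str(site_inv + 3)}]
--     return grow, grow_inv
-- ===== SOURCE B (Python) =====
-- def gen_grow(num_sites, reptate=False):
--     dih = [("dihedral", "true")]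
--     rep = [("reptate", "true"), ("num_steps", "1")]
--     last = num_sites - 1
--
--     def row(site):
--         if reptate:
--             if site == last:
--                 return (dih, [("mobile_site", site), ("anchor_site", site - 1), ("anchor_site2", site - 2), ("anchor_site3", site - 3)])
--             return (rep, [("mobile_site", site), ("anchor_site", site + 1)])
--         if site == 0:
--             return ([("transfer", "true")], [("site", 0)])
--         if site == 1:
--             return ([("bond", "true")], [("mobile_site", 1), ("anchor_site", 0)])
--         if site == 2:
--             return ([("angle", "true")], [("mobile_site", 2), ("anchor_site", 1), ("anchor_site2", 0)])
--         return (dih, [("mobile_site", site), ("anchor_site", site - 1), ("anchor_site2", site - 2), ("anchor_site3", site - 3)])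
--
--     rows = [row(s) for s in range(num_sites)]
--     grow = [dict(fp + [(k, str(i)) for k, i in sites]) for fp, sites in rows]
--     grow_inv = [dict(fp + [(k, str(last - i)) for k, i in sites]) for fp, sites in rows]
--     return grow, grow_inv
-- ===== Notes on version B (the rewrite author's own statement) =====
-- stated objective: simpler
-- what changed: A writes every dict twice (one literal per branch for grow and another for grow_inv); B builds one abstract row per site (flag keys plus integer site indices) and renders grow and grow_inv from the same rows, mirroring indices as num_sites-1-i for the inverse.
import Mathlib
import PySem

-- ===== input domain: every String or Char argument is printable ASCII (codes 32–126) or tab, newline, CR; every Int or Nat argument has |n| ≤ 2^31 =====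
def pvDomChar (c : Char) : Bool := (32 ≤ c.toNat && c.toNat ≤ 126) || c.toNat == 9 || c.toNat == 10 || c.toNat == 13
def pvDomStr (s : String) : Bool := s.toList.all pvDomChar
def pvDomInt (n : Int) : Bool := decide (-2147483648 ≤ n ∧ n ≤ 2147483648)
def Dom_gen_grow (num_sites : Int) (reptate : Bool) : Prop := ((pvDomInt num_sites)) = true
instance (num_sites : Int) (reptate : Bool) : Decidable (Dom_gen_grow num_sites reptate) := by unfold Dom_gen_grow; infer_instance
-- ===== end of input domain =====

-- B replaces A's duplicated per-branch dict literals by one abstract row per site rendered twice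
-- (indices mirrored as num_sites-1-i for grow_inv): simpler, same O(n) cost.

-- ===== PORT A =====
-- one iteration of A's loop: appends one dict to grow and one to grow_inv
def genGrowStep (num_sites : Int) (reptate : Bool)
    (acc : (List (List (String × String))) × (List (List (String × String)))) (site : Int) :
    (List (List (String × String))) × (List (List (String × String))) :=
  let site_inv := num_sites - site - 1
  if reptate then
    if site = num_sites - 1 then
      (acc.1 ++ [[("dihedral", "true"), ("mobile_site", PySem.Int.toStr site), ("anchor_site", PySem.Int.toStr (site - 1)), ("anchor_site2", PySem.Int.toStr (site - 2)), ("anchor_site3", PySem.Int.toStr (site - 3))]],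
       acc.2 ++ [[("dihedral", "true"), ("mobile_site", "0"), ("anchor_site", "1"), ("anchor_site2", "2"), ("anchor_site3", "3")]])
    else
      (acc.1 ++ [[("reptate", "true"), ("num_steps", "1"), ("mobile_site", PySem.Int.toStr site), ("anchor_site", PySem.Int.toStr (site + 1))]],
       acc.2 ++ [[("reptate", "true"), ("num_steps", "1"), ("mobile_site", PySem.Int.toStr site_inv), ("anchor_site", PySem.Int.toStr (site_inv - 1))]])
  else if site = 0 then
    (acc.1 ++ [[("transfer", "true"), ("site", "0")]],
     acc.2 ++ [[("transfer", "true"), ("site", PySem.Int.toStr site_inv)]])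
  else if site = 1 then
    (acc.1 ++ [[("bond", "true"), ("mobile_site", "1"), ("anchor_site", "0")]],
     acc.2 ++ [[("bond", "true"), ("mobile_site", PySem.Int.toStr site_inv), ("anchor_site", PySem.Int.toStr (site_inv + 1))]])
  else if site = 2 then
    (acc.1 ++ [[("angle", "true"), ("mobile_site", "2"), ("anchor_site", "1"), ("anchor_site2", "0")]],
     acc.2 ++ [[("angle", "true"), ("mobile_site", PySem.Int.toStr site_inv), ("anchor_site", PySem.Int.toStr (site_inv + 1)), ("anchor_site2", PySem.Int.toStr (site_inv + 2))]])
  else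
    (acc.1 ++ [[("dihedral", "true"), ("mobile_site", PySem.Int.toStr site), ("anchor_site", PySem.Int.toStr (site - 1)), ("anchor_site2", PySem.Int.toStr (site - 2)), ("anchor_site3", PySem.Int.toStr (site - 3))]],
     acc.2 ++ [[("dihedral", "true"), ("mobile_site", PySem.Int.toStr site_inv), ("anchor_site", PySem.Int.toStr (site_inv + 1)), ("anchor_site2", PySem.Int.toStr (site_inv + 2)), ("anchor_site3", PySem.Int.toStr (site_inv + 3))]])

def gen_grow (num_sites : Int) (reptate : Bool) : (List (List (String × String))) × (List (List (String × String))) :=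
  (PySem.List.pyRange 0 num_sites 1).foldl (genGrowStep num_sites reptate) ([], [])

-- ===== PORT B =====
-- B's 'row': the pre-rendered flag pairs and the (site-key, integer index) pairs of one site's dict
def genGrowRow (num_sites : Int) (reptate : Bool) (site : Int) : List (String × String) × List (String × Int) :=
  if reptate then
    if site = num_sites - 1 then
      ([("dihedral", "true")], [("mobile_site", site), ("anchor_site", site - 1), ("anchor_site2", site - 2), ("anchor_site3", site - 3)])
    else
      ([("reptate", "true"), ("num_steps", "1")], [("mobile_site", site), ("anchor_site", site + 1)])
  else if site = 0 then
    ([("transfer", "true")], [("site", 0)])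
  else if site = 1 then
    ([("bond", "true")], [("mobile_site", 1), ("anchor_site", 0)])
  else if site = 2 then
    ([("angle", "true")], [("mobile_site", 2), ("anchor_site", 1), ("anchor_site2", 0)])
  else
    ([("dihedral", "true")], [("mobile_site", site), ("anchor_site", site - 1), ("anchor_site2", site - 2), ("anchor_site3", site - 3)])

-- the two comprehensions: flag pairs ++ site keys with str(i), resp. str(num_sites-1-i);
-- all keys distinct, so each dict is exactly this association list
def gen_grow_alt (num_sites : Int) (reptate : Bool) : (List (List (String × String))) × (List (List (String × String))) :=
  let rows := (PySem.List.pyRange 0 num_sites 1).map (genGrowRow num_sites reptate)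
  (rows.map (fun fs => fs.1 ++ fs.2.map (fun ki => (ki.1, PySem.Int.toStr ki.2))),
   rows.map (fun fs => fs.1 ++ fs.2.map (fun ki => (ki.1, PySem.Int.toStr (num_sites - 1 - ki.2)))))

-- ===== PRECONDITION & SPEC =====
def Spec_gen_grow (num_sites : Int) (reptate : Bool) (out : (List (List (String × String))) × (List (List (String × String)))) : Prop := out = gen_grow_alt num_sites reptate
instance (num_sites : Int) (reptate : Bool) (out : (List (List (String × String))) × (List (List (String × String)))) : Decidable (Spec_gen_grow num_sites reptate out) := by unfold Spec_gen_grow; infer_instance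

-- ===== CLAIM (what is proved, stated in full; the proofs are below) =====
def Claim_equal_gen_grow : Prop := ∀ (num_sites : Int) (reptate : Bool), Dom_gen_grow num_sites reptate → Spec_gen_grow num_sites reptate (gen_grow num_sites reptate)

-- ===== LEMMAS AND PROOFS =====

-- the single dict A appends to grow at a given site (read off A's branches)
def itemA (num_sites : Int) (reptate : Bool) (site : Int) : List (String × String) :=
  ((genGrowStep num_sites reptate ([], []) site).1).headD []

def itemAInv (num_sites : Int) (reptate : Bool) (site : Int) : List (String × String) :=
  ((genGrowStep num_sites reptate ([], []) site).2).headD []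

theorem genGrowStep_eq (num_sites : Int) (reptate : Bool)
    (acc : (List (List (String × String))) × (List (List (String × String)))) (site : Int) :
    genGrowStep num_sites reptate acc site =
      (acc.1 ++ [itemA num_sites reptate site], acc.2 ++ [itemAInv num_sites reptate site]) := by
  simp only [genGrowStep, itemA, itemAInv]
  split_ifs <;> rfl

theorem foldl_genGrowStep (num_sites : Int) (reptate : Bool) (l : List Int)
    (acc : (List (List (String × String))) × (List (List (String × String)))) :
    l.foldl (genGrowStep num_sites reptate) acc =
      (acc.1 ++ l.map (itemA num_sites reptate), acc.2 ++ l.map (itemAInv num_sites reptate)) := by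
  induction l generalizing acc with
  | nil => simp
  | cons x xs ih =>
    simp only [List.foldl_cons, List.map_cons, ih, genGrowStep_eq]
    simp

theorem itemA_eq (num_sites : Int) (reptate : Bool) (site : Int) :
    itemA num_sites reptate site =
      (genGrowRow num_sites reptate site).1 ++
        (genGrowRow num_sites reptate site).2.map (fun ki => (ki.1, PySem.Int.toStr ki.2)) := by
  simp only [itemA, genGrowStep, genGrowRow]
  split_ifs <;> simp_all <;> decide

theorem itemAInv_eq (num_sites : Int) (reptate : Bool) (site : Int) :
    itemAInv num_sites reptate site =
      (genGrowRow num_sites reptate site).1 ++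
        (genGrowRow num_sites reptate site).2.map (fun ki => (ki.1, PySem.Int.toStr (num_sites - 1 - ki.2))) := by
  simp only [itemAInv, genGrowStep, genGrowRow]
  split_ifs <;> simp_all <;> ring_nf <;> decide

-- ===== VERDICT (by name: the statement is the Claim_ definition above) =====
theorem gen_grow_spec : Claim_equal_gen_grow := by
  intro num_sites reptate _
  show gen_grow num_sites reptate = gen_grow_alt num_sites reptate
  simp only [gen_grow, gen_grow_alt, foldl_genGrowStep, List.nil_append, List.map_map]
  refine Prod.ext ?_ ?_ <;>
    · apply List.map_congr_left; intro site _
      simp [itemA_eq, itemAInv_eq, Function.comp]
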